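-- pv_equiv track=rewrite | github.com/Ho011/learning_python | bit_manipulation/binary_or_operator.py | binary_or
-- ===== SOURCE A (Python) =====
-- def binary_or(a: int , b: int) -> str:
--     """
--     Take in 2 integers, convert them to binary,
--     return a binary number that is the
--     result of a binary or operation on the integers provided.
--     """
--
--     if a < 0 or b < 0:
--         raise ValueError('The value of both number must be positive')
--
--     a_bin = str(bin(a))[2:] # remove the leading "0b"
--     b_bin = str(bin(b))[2:] # remove the leading "0b"
--
--     max_length = max( len(a_bin) , len(b_bin) )
--
--     return '0b' + "".join(
--         str( int( '1' in [a_bit , b_bit] ) )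
--         for a_bit , b_bit in zip(a_bin.zfill(max_length) , b_bin.zfill(max_length))
--     )
-- ===== SOURCE B (Python) =====
-- def binary_or(a: int, b: int) -> str:
--     if a < 0 or b < 0:
--         raise ValueError('The value of both number must be positive')
--     return '0b' + bin(a | b)[2:]
-- ===== Notes on version B (the rewrite author's own statement) =====
-- stated objective: simpler
-- what changed: Replaces the pad/zip/join bit-by-bit string loop with a single native integer OR and one bin() call (closed form instead of iteration).
import Mathlib
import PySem

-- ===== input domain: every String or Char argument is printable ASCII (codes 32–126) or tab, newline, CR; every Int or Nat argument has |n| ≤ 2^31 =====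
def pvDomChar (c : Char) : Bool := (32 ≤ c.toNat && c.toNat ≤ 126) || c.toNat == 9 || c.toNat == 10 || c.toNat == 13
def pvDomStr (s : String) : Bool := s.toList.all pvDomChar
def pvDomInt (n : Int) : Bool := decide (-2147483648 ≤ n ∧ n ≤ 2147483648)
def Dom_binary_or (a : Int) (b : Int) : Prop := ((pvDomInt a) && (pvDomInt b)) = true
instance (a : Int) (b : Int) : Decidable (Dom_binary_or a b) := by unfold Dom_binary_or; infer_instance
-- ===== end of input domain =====

-- B replaces A's pad/zip/join bit-by-bit string loop with a single integer OR and one bin() call (simpler, closed form).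

-- ===== PORT A =====
-- A: pad the two binary strings to equal length and OR them character by character.
def binary_or (a : Int) (b : Int) : String :=
  -- 'if a < 0 or b < 0: raise ValueError' — excluded by Pre_binary_or
  let a_bin : List Char := PySem.List.slice (PySem.Int.toBinChars0b a) (some 2) none  -- str(bin(a))[2:]
  let b_bin : List Char := PySem.List.slice (PySem.Int.toBinChars0b b) (some 2) none  -- str(bin(b))[2:]
  let max_length : Int := max (PySem.List.len a_bin) (PySem.List.len b_bin)
  String.ofList ('0' :: 'b' ::
    ((PySem.Chars.zfill a_bin max_length).zip (PySem.Chars.zfill b_bin max_length)).map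
      (fun p => if p.1 = '1' ∨ p.2 = '1' then '1' else '0'))  -- str(int('1' in [a_bit, b_bit]))

-- ===== PORT B =====
-- B: '0b' + bin(a | b)[2:]
def binary_or_alt (a : Int) (b : Int) : String :=
  -- 'if a < 0 or b < 0: raise ValueError' — excluded by Pre_binary_or
  String.ofList ('0' :: 'b' ::
    PySem.List.slice (PySem.Int.toBinChars0b (PySem.Int.bor a b)) (some 2) none)

-- ===== PRECONDITION & SPEC =====
-- Pre_ excludes exactly the inputs with a < 0 or b < 0, on which both A and B raise ValueError.
def Pre_binary_or (a : Int) (b : Int) : Prop := 0 ≤ a ∧ 0 ≤ b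
instance (a : Int) (b : Int) : Decidable (Pre_binary_or a b) := by unfold Pre_binary_or; infer_instance
def pvWitness_binary_or : Int × Int := (5, 3)
def Spec_binary_or (a : Int) (b : Int) (out : String) : Prop := out = binary_or_alt a b
instance (a : Int) (b : Int) (out : String) : Decidable (Spec_binary_or a b out) := by unfold Spec_binary_or; infer_instance

-- ===== CLAIM (what is proved, stated in full; the proofs are below) =====
def Claim_equal_binary_or : Prop := ∀ (a : Int) (b : Int), Dom_binary_or a b → Pre_binary_or a b → Spec_binary_or a b (binary_or a b)

-- ===== LEMMAS AND PROOFS =====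

/-- The binary digits of `n`, most significant first (a single '0' for `n = 0`);
this is what `Nat.toDigits 2` computes. -/
def msbChars (n : Nat) : List Char :=
  if _h : n < 2 then [Nat.digitChar n]
  else msbChars (n / 2) ++ [Nat.digitChar (n % 2)]
decreasing_by exact Nat.div_lt_self (by omega) (by omega)

/-- `n` rendered on exactly `L` bits, most significant first, via `testBit`. -/
def padChars (n L : Nat) : List Char :=
  (List.range L).reverse.map (fun i => if n.testBit i then '1' else '0')

lemma padChars_succ (n L : Nat) :
    padChars n (L + 1) = (if n.testBit L then '1' else '0') :: padChars n L := by
  simp [padChars, List.range_succ]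

lemma padChars_snoc (n L : Nat) :
    padChars n (L + 1) = padChars (n / 2) L ++ [if n.testBit 0 then '1' else '0'] := by
  have h : List.range (L + 1) = 0 :: (List.range L).map Nat.succ := List.range_succ_eq_map (n := L)
  simp [padChars, h, Function.comp_def, Nat.testBit_add_one, Nat.succ_eq_add_one]

lemma padChars_length (n L : Nat) : (padChars n L).length = L := by
  simp [padChars]

lemma msbChars_small (n : Nat) (h : n < 2) : msbChars n = [Nat.digitChar n] := by
  rw [msbChars, dif_pos h]

lemma msbChars_step (n : Nat) (h : 2 ≤ n) :
    msbChars n = msbChars (n / 2) ++ [Nat.digitChar (n % 2)] := by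
  rw [msbChars, dif_neg (by omega)]

lemma msbChars_len_pos (n : Nat) : 0 < (msbChars n).length := by
  by_cases h : n < 2
  · simp [msbChars_small n h]
  · simp [msbChars_step n (by omega)]

lemma msbChars_lt_two_pow (n : Nat) : n < 2 ^ (msbChars n).length := by
  induction n using Nat.strong_induction_on with
  | _ n ih =>
    by_cases h : n < 2
    · simpa [msbChars_small n h] using by omega
    · have := ih (n / 2) (Nat.div_lt_self (by omega) (by omega))
      rw [msbChars_step n (by omega)]
      simp only [List.length_append, List.length_singleton]
      rw [pow_succ]
      omega

lemma digitChar_mod_two (n : Nat) :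
    Nat.digitChar (n % 2) = if n.testBit 0 then '1' else '0' := by
  have h : n % 2 = 0 ∨ n % 2 = 1 := by omega
  rcases h with h | h <;> simp [Nat.testBit_zero, h, Nat.digitChar]

lemma msbChars_eq_padChars (n : Nat) : msbChars n = padChars n (msbChars n).length := by
  induction n using Nat.strong_induction_on with
  | _ n ih =>
    by_cases h : n < 2
    · rw [msbChars_small n h]
      interval_cases n <;> rfl
    · have ih' := ih (n / 2) (Nat.div_lt_self (by omega) (by omega))
      rw [msbChars_step n (by omega)]
      simp only [List.length_append, List.length_singleton]
      rw [padChars_snoc, ← ih', digitChar_mod_two]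

lemma padChars_of_le (n L M : Nat) (hn : n < 2 ^ L) (hLM : L ≤ M) :
    padChars n M = List.replicate (M - L) '0' ++ padChars n L := by
  obtain ⟨k, rfl⟩ := Nat.exists_eq_add_of_le hLM
  induction k with
  | zero => simp
  | succ k ih =>
    have hfalse : n.testBit (L + k) = false :=
      Nat.testBit_eq_false_of_lt (lt_of_lt_of_le hn (Nat.pow_le_pow_right (by omega) (by omega)))
    rw [show L + (k + 1) = (L + k) + 1 by omega, padChars_succ, hfalse, ih (by omega),
      show L + k + 1 - L = (L + k - L) + 1 by omega, List.replicate_succ]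
    simp

lemma msbChars_mem (n : Nat) (c : Char) (hc : c ∈ msbChars n) : c = '0' ∨ c = '1' := by
  induction n using Nat.strong_induction_on with
  | _ n ih =>
    by_cases h : n < 2
    · rw [msbChars_small n h] at hc
      interval_cases n <;> simp_all [Nat.digitChar]
    · rw [msbChars_step n (by omega)] at hc
      rcases List.mem_append.mp hc with h1 | h2
      · exact ih (n / 2) (Nat.div_lt_self (by omega) (by omega)) h1
      · have h0 : n % 2 = 0 ∨ n % 2 = 1 := by omega
        rcases h0 with h0 | h0 <;> simp_all [Nat.digitChar]

/-- zfill of the binary-digit string to any width `M` at least its length is `padChars`. -/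
lemma zfill_msbChars (n M : Nat) (hM : (msbChars n).length ≤ M) :
    PySem.Chars.zfill (msbChars n) (M : Int) = padChars n M := by
  rw [PySem.Chars.zfill.eq_def]
  rcases Nat.eq_or_lt_of_le hM with heq | hlt
  · rw [if_pos (by exact_mod_cast Nat.le_of_eq heq.symm), msbChars_eq_padChars, heq]
  · rw [if_neg (by omega)]
    have hne : msbChars n ≠ [] := by
      have := msbChars_len_pos n
      intro h; simp [h] at this
    obtain ⟨c, rest, hcr⟩ := List.exists_cons_of_ne_nil hne
    rw [hcr]
    have hc : c = '0' ∨ c = '1' := msbChars_mem n c (by rw [hcr]; exact List.mem_cons_self)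
    split
    · rename_i c1 rest1 heq
      obtain ⟨rfl, rfl⟩ : c1 = c ∧ rest1 = rest := by
        refine ⟨?_, ?_⟩ <;> injection heq <;> simp_all
      rw [if_neg (by rcases hc with h | h <;> simp [h])]
      rw [← hcr, Int.toNat_natCast,
        padChars_of_le n (msbChars n).length M (msbChars_lt_two_pow n) hM,
        msbChars_eq_padChars n]
      simp [padChars_length]
    · rename_i heq
      exact absurd heq (by simp)

/-- Bitwise-OR of two equal-width renderings, character by character. -/
lemma padChars_or (x y L : Nat) :
    ((padChars x L).zip (padChars y L)).map
        (fun p => if p.1 = '1' ∨ p.2 = '1' then '1' else '0') =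
      padChars (x ||| y) L := by
  unfold padChars
  rw [List.zip_map', List.map_map]
  apply List.map_congr_left
  intro i _
  simp only [Function.comp_def, Nat.testBit_or]
  cases hx : x.testBit i <;> cases hy : y.testBit i <;> simp

lemma or_div_two (x y : Nat) : (x ||| y) / 2 = x / 2 ||| y / 2 := by
  rw [← Nat.shiftRight_one, ← Nat.shiftRight_one, ← Nat.shiftRight_one,
    Nat.shiftRight_or_distrib]

/-- The OR of two numbers needs exactly the max of their digit counts. -/
lemma msbChars_or_length (x y : Nat) :
    (msbChars (x ||| y)).length = max (msbChars x).length (msbChars y).length := by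
  induction hn : x + y using Nat.strong_induction_on generalizing x y with
  | _ n ih =>
    subst hn
    by_cases hx : x < 2
    · by_cases hy : y < 2
      · interval_cases x <;> interval_cases y <;>
          simp [msbChars_small]
      · have h2 : 2 ≤ x ||| y := le_trans (by omega) Nat.right_le_or
        rw [msbChars_step _ h2, msbChars_step y (by omega), or_div_two]
        have hrec := ih (x / 2 + y / 2) (by omega) (x / 2) (y / 2) rfl
        simp only [List.length_append, List.length_singleton, hrec]
        have hx2 : x / 2 = 0 := by omega
        have h1 : (msbChars (x / 2)).length = 1 := by
          rw [hx2, msbChars_small 0 (by decide)]; rfl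
        have h1' : (msbChars x).length = 1 := by
          rw [msbChars_small x hx]; rfl
        have := msbChars_len_pos (y / 2)
        simp only [h1, h1']
        omega
    · have h2 : 2 ≤ x ||| y := le_trans (by omega) Nat.left_le_or
      rw [msbChars_step _ h2, msbChars_step x (by omega), or_div_two]
      have hrec := ih (x / 2 + y / 2) (by omega) (x / 2) (y / 2) rfl
      simp only [List.length_append, List.length_singleton, hrec]
      by_cases hy : y < 2
      · have hy2 : y / 2 = 0 := by omega
        have h1 : (msbChars (y / 2)).length = 1 := by
          rw [hy2, msbChars_small 0 (by decide)]; rfl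
        have h1' : (msbChars y).length = 1 := by
          rw [msbChars_small y hy]; rfl
        have := msbChars_len_pos (x / 2)
        simp only [h1, h1']
        omega
      · rw [msbChars_step y (by omega)]
        simp only [List.length_append, List.length_singleton]
        have := msbChars_len_pos (x / 2)
        have := msbChars_len_pos (y / 2)
        omega

lemma toDigitsCore_two (f : Nat) : ∀ (n : Nat) (ds : List Char), n < f →
    Nat.toDigitsCore 2 f n ds = msbChars n ++ ds := by
  induction f with
  | zero => intro n ds h; omega
  | succ f ih =>
    intro n ds h
    rw [Nat.toDigitsCore]
    by_cases h2 : n < 2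
    · rw [if_pos (by omega), msbChars_small n h2, Nat.mod_eq_of_lt h2]
      rfl
    · rw [if_neg (by omega), ih (n / 2) _ (by omega), msbChars_step n (by omega)]
      simp

lemma toDigits_two (n : Nat) : Nat.toDigits 2 n = msbChars n := by
  rw [Nat.toDigits]
  simpa using toDigitsCore_two (n + 1) n [] (by omega)

lemma toBinChars0b_natCast (n : Nat) :
    PySem.Int.toBinChars0b (n : Int) = '0' :: 'b' :: msbChars n := by
  rw [PySem.Int.toBinChars0b, if_neg (by omega)]
  simp [toDigits_two]

lemma slice_two_cons (l : List Char) (c d : Char) :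
    PySem.List.slice (c :: d :: l) (some 2) none = l := by
  rw [PySem.List.slice_from _ (by omega)]
  rfl

-- ===== VERDICT (by name: the statement is the Claim_ definition above) =====
theorem binary_or_spec : Claim_equal_binary_or := by
  intro a b _ hpre
  obtain ⟨ha, hb⟩ := hpre
  lift a to ℕ using ha with na
  lift b to ℕ using hb with nb
  unfold Spec_binary_or binary_or binary_or_alt
  rw [PySem.Int.bor_natCast]
  rw [toBinChars0b_natCast, toBinChars0b_natCast, toBinChars0b_natCast,
    slice_two_cons, slice_two_cons, slice_two_cons]
  simp only [PySem.List.len_eq]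
  rw [← Nat.cast_max]
  set M : Nat := max (msbChars na).length (msbChars nb).length with hM
  rw [zfill_msbChars na M (le_max_left _ _), zfill_msbChars nb M (le_max_right _ _),
    padChars_or]
  rw [show M = (msbChars (na ||| nb)).length from (msbChars_or_length na nb).symm ▸ hM,
    ← msbChars_eq_padChars]
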